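-- pv_equiv track=rewrite | github.com/hvavhp/calico-solver | solvers/design_goals_solver.py | _canonical_form
-- ===== SOURCE A (Python) =====
-- def _canonical_form(
--     solution: tuple[list[int], list[int], list[int]],
-- ) -> tuple[tuple[int, ...], tuple[int, ...], tuple[int, ...]]:
--     """Convert solution to canonical form by mapping values to standardized labels.
--
--     Two solutions are equivalent if they have the same canonical form.
--     The canonical form uses consecutive integers 0, 1, 2, ... based on
--     the order of first appearance of values in the combined (x, t, p) sequence.
--     """
--     x_sol, t_sol, p_sol = solution
--
--     # Combine all values in order of appearance
--     all_values = x_sol + t_sol + p_sol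
--
--     # Create mapping from original values to canonical labels (0, 1, 2, ...)
--     value_to_label = {}
--     next_label = 0
--
--     for val in all_values:
--         if val not in value_to_label:
--             value_to_label[val] = next_label
--             next_label += 1
--
--     # Convert solution to canonical form
--     canonical_x = tuple(value_to_label[val] for val in x_sol)
--     canonical_t = tuple(value_to_label[val] for val in t_sol)
--     canonical_p = tuple(value_to_label[val] for val in p_sol)
--
--     return (canonical_x, canonical_t, canonical_p)
-- ===== SOURCE B (Python) =====
-- def _canonical_form(
--     solution: tuple[list[int], list[int], list[int]],
-- ) -> tuple[tuple[int, ...], tuple[int, ...], tuple[int, ...]]: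
--     """No label table at all: the canonical label of a value is the number of
--     distinct values occurring strictly before its first occurrence in x+t+p,
--     computed per element as len(set(seq[:seq.index(v)]))."""
--     x_sol, t_sol, p_sol = solution
--     seq = x_sol + t_sol + p_sol
--
--     def label(v):
--         return len(set(seq[: seq.index(v)]))
--
--     return (
--         tuple(label(v) for v in x_sol),
--         tuple(label(v) for v in t_sol),
--         tuple(label(v) for v in p_sol),
--     )
-- ===== Notes on version B (the rewrite author's own statement) =====
-- stated objective: alternative
-- what changed: B keeps no label table at all: each element's label is computed directly as the count of distinct values strictly before its first occurrence in the concatenated sequence (len(set(seq[:seq.index(v)]))), replacing A's build-a-dict-then-remap scheme; B trades A's linear time for a table-free quadratic closed form.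
import Mathlib
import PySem

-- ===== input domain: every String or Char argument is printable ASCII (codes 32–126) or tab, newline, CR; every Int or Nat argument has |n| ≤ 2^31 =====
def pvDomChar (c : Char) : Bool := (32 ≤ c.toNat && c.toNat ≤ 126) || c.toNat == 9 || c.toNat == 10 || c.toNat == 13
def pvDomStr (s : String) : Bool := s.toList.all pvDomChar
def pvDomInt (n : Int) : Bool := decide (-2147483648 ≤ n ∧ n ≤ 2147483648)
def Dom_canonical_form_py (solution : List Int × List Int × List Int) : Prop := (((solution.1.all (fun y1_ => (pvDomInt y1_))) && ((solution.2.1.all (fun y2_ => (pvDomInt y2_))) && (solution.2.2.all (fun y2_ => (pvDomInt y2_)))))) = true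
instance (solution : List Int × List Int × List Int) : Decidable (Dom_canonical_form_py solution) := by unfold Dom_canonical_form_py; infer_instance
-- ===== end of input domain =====

-- B drops A's label dictionary entirely: each label is computed per element as the
-- count of distinct values before its first occurrence (alternative, not faster).

-- ===== PORT A =====
-- literal port: build value_to_label over x ++ t ++ p with an explicit next_label counter,
-- then remap each list by dictionary lookup (key always present, so getD's default is unreachable)
def canonical_form_py (solution : List Int × List Int × List Int) : List Int × List Int × List Int :=
  let x_sol := solution.1
  let t_sol := solution.2.1
  let p_sol := solution.2.2
  let all_values := x_sol ++ t_sol ++ p_sol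
  let st := all_values.foldl
    (fun (s : PySem.Dict Int Int × Int) val =>
      if s.1.contains val then s else (s.1.insert val s.2, s.2 + 1))
    (PySem.Dict.empty, 0)
  let value_to_label := st.1
  (x_sol.map (fun val => value_to_label.getD val 0),
   t_sol.map (fun val => value_to_label.getD val 0),
   p_sol.map (fun val => value_to_label.getD val 0))

-- ===== PORT B =====
-- Source B's label(v) = len(set(seq[:seq.index(v)])); the none branch is unreachable
-- (label is only called on elements of seq; Python would raise ValueError there)
def pvLabel (seq : List Int) (v : Int) : Int :=
  match PySem.List.index? seq v with
  | some i => PySem.Set.len (PySem.Set.ofList (PySem.List.slice seq none (some (i : Int))))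
  | none => 0

def canonical_form_py_alt (solution : List Int × List Int × List Int) : List Int × List Int × List Int :=
  let x_sol := solution.1
  let t_sol := solution.2.1
  let p_sol := solution.2.2
  let seq := x_sol ++ t_sol ++ p_sol
  (x_sol.map (fun v => pvLabel seq v),
   t_sol.map (fun v => pvLabel seq v),
   p_sol.map (fun v => pvLabel seq v))

-- ===== PRECONDITION & SPEC =====
def Spec_canonical_form_py (solution : List Int × List Int × List Int) (out : List Int × List Int × List Int) : Prop := out = canonical_form_py_alt solution
instance (solution : List Int × List Int × List Int) (out : List Int × List Int × List Int) : Decidable (Spec_canonical_form_py solution out) := by unfold Spec_canonical_form_py; infer_instance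

-- ===== CLAIM =====
def Claim_equal_canonical_form_py : Prop := ∀ (solution : List Int × List Int × List Int), Dom_canonical_form_py solution → Spec_canonical_form_py solution (canonical_form_py solution)

-- ===== LEMMAS AND PROOFS =====

-- the common single step: add a fresh value with label = current size
def pvStep (d : PySem.Dict Int Int) (v : Int) : PySem.Dict Int Int :=
  if d.contains v then d else d.insert v (d.size : Int)

-- A's fold (with its explicit counter) equals the counter-free pvStep fold
theorem pvA_fold (l : List Int) (d : PySem.Dict Int Int) (n : Int) (hn : n = (d.size : Int)) :
    l.foldl (fun (s : PySem.Dict Int Int × Int) val =>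
      if s.1.contains val then s else (s.1.insert val s.2, s.2 + 1)) (d, n)
    = (l.foldl pvStep d, ((l.foldl pvStep d).size : Int)) := by
  induction l generalizing d n with
  | nil => simp [hn]
  | cons v vs ih =>
      simp only [List.foldl_cons]
      by_cases h : d.contains v = true
      · rw [if_pos h, ih d n hn]
        simp [pvStep, h]
      · rw [if_neg h]
        have hs : (d.insert v n).size = d.size + 1 := by
          rw [PySem.Dict.size_insert]
          simp [h]
        rw [ih (d.insert v n) (n + 1) (by rw [hs]; push_cast; omega)]
        simp [pvStep, h, hn]

-- invariant of A's dictionary loop: keys are the seen set, and the stored label of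
-- each key is its index among the distinct seen values
theorem pvFold_inv (l : List Int) (d : PySem.Dict Int Int) (s : List Int)
    (hk : d.keys = s)
    (hg : ∀ v ∈ s, d.get? v = (PySem.List.index? s v).map (fun n => (n : Int))) :
    (l.foldl pvStep d).keys = PySem.Set.update s l ∧
    ∀ v ∈ PySem.Set.update s l,
      (l.foldl pvStep d).get? v
        = (PySem.List.index? (PySem.Set.update s l) v).map (fun n => (n : Int)) := by
  induction l generalizing d s with
  | nil => rw [List.foldl_nil, PySem.Set.update_nil]; exact ⟨hk, hg⟩
  | cons v vs ih =>
      rw [List.foldl_cons, PySem.Set.update_cons]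
      have hc : d.contains v = decide (v ∈ s) := by
        rw [PySem.Dict.contains_eq_decide_mem_keys, hk]
      by_cases hv : v ∈ s
      · have hstep : pvStep d v = d := by simp [pvStep, hc, hv]
        have hadd : PySem.Set.add s v = s := PySem.Set.add_of_mem hv
        rw [hstep, hadd]
        exact ih d s hk hg
      · have hstep : pvStep d v = d.insert v (d.size : Int) := by simp [pvStep, hc, hv]
        have hsize : (d.size : Int) = (s.length : Int) := by
          have : d.keys.length = s.length := by rw [hk]
          simp only [PySem.Dict.size]
          simpa [PySem.Dict.keys] using this
        have hadd : PySem.Set.add s v = s ++ [v] := PySem.Set.add_of_not_mem hv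
        rw [hstep, hadd]
        apply ih
        · rw [PySem.Dict.keys_insert_of_not_contains _ _ (by simp [hc, hv]), hk]
        · intro u hu
          rcases List.mem_append.mp hu with hu | hu
          · have hne : u ≠ v := fun e => hv (e ▸ hu)
            rw [PySem.Dict.get?_insert_of_ne _ _ hne, hg u hu,
              PySem.List.index?_append_of_mem [v] hu]
          · have : u = v := by simpa using hu
            subst this
            rw [PySem.Dict.get?_insert_self, PySem.List.index?_append_singleton_self s u hv]
            simp [hsize]

-- ===== VERDICT =====
theorem canonical_form_py_spec : Claim_equal_canonical_form_py := by
  intro sol _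
  obtain ⟨x, t, p⟩ := sol
  unfold Spec_canonical_form_py canonical_form_py canonical_form_py_alt
  simp only
  rw [pvA_fold (x ++ t ++ p) PySem.Dict.empty 0 (by simp)]
  set seq := x ++ t ++ p with hseq
  obtain ⟨hkeys, hget⟩ := pvFold_inv seq PySem.Dict.empty []
    (by simp) (by intro v hv; cases hv)
  rw [PySem.Set.update_nil_left] at hkeys hget
  have hmain : ∀ v ∈ seq,
      (seq.foldl pvStep PySem.Dict.empty).getD v 0 = pvLabel seq v := by
    intro v hv
    obtain ⟨k, hk⟩ := (PySem.List.index?_isSome_iff (xs := seq) (v := v)).mpr hv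
      |> Option.isSome_iff_exists.mp
    obtain ⟨pre, suf, hdec, hlen, hpre⟩ := (PySem.List.index?_eq_some_iff seq v k).mp hk
    -- B's label
    have hB : pvLabel seq v = ((PySem.Set.ofList pre).length : Int) := by
      unfold pvLabel
      have hslice : PySem.List.slice seq none (some ((k : Nat) : Int)) = pre := by
        rw [PySem.List.slice_to_natCast, hdec, ← hlen, List.take_left]
      rw [hk]
      simp only [hslice, PySem.Set.len]
    -- A's label
    have hvmem : v ∉ PySem.Set.ofList pre := by
      rw [PySem.Set.mem_ofList]; exact hpre
    have hofl : PySem.Set.ofList seq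
        = (PySem.Set.ofList pre ++ [v]) ++
          (PySem.Set.ofList suf).filter (fun y => !(PySem.Set.contains (PySem.Set.ofList pre ++ [v]) y)) := by
      rw [hdec, PySem.Set.ofList_append, PySem.Set.update_cons,
        PySem.Set.add_of_not_mem hvmem, PySem.Set.update_eq_append_filter]
    have hidx : PySem.List.index? (PySem.Set.ofList seq) v
        = some (PySem.Set.ofList pre).length := by
      rw [hofl, PySem.List.index?_append_of_mem _ (by simp),
        PySem.List.index?_append_singleton_self _ v hvmem]
    have hv' : v ∈ PySem.Set.ofList seq := by rw [PySem.Set.mem_ofList]; exact hv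
    rw [PySem.Dict.getD_eq_get?_getD, hget v hv', hidx, hB]
    rfl
  refine Prod.ext ?_ (Prod.ext ?_ ?_) <;> simp only <;>
    exact List.map_congr_left (fun v hv => hmain v (by
      rw [hseq]; simp [hv]))
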